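-- pv_equiv track=rewrite | github.com/harjassand/AGI-Stack-Unchained | CDEL-v2/cdel/v1_6r/rsi_transfer_tracker.py | _alpha_streak
-- ===== SOURCE A (Python) =====
-- def _alpha_streak(values: list[int], alpha_num: int, alpha_den: int, k: int) -> bool:
--     if k <= 0:
--         return True
--     streak = 0
--     for idx in range(1, len(values)):
--         if values[idx] * alpha_den <= values[idx - 1] * alpha_num:
--             streak += 1
--             if streak >= k:
--                 return True
--         else:
--             streak = 0
--     return False
-- ===== SOURCE B (Python) =====
-- def _alpha_streak(values: list[int], alpha_num: int, alpha_den: int, k: int) -> bool: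
--     if k <= 0:
--         return True
--     conds = [values[i] * alpha_den <= values[i - 1] * alpha_num
--              for i in range(1, len(values))]
--     if not conds:
--         return False
--     # run-length encode the condition stream, then test the maximal runs
--     runs = []
--     cur, n = conds[0], 1
--     for c in conds[1:]:
--         if c == cur:
--             n += 1
--         else:
--             runs.append((cur, n))
--             cur, n = c, 1
--     runs.append((cur, n))
--     return any(key and cnt >= k for key, cnt in runs)
-- ===== Notes on version B (the rewrite author's own statement) =====
-- stated objective: alternative
-- what changed: B separates the work into three phases - build the boolean pair-condition stream, run-length encode it, then test whether some maximal True run reaches k - instead of A's single pass with a streak counter and early return.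
import Mathlib
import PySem

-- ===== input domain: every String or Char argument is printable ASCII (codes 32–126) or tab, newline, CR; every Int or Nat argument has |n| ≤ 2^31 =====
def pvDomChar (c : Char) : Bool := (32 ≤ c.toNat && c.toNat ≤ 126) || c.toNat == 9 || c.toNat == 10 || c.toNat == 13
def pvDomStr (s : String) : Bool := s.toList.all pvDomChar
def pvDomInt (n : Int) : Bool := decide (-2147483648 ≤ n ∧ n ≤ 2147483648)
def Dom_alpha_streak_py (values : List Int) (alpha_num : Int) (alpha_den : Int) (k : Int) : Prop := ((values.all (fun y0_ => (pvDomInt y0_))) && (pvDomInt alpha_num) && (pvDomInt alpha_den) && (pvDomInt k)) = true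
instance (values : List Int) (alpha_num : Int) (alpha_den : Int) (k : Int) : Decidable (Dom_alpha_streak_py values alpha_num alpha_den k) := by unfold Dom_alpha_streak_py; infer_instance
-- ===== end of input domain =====

-- B replaces A's single streak-counter pass with three phases (condition stream, run-length
-- encoding, test of the maximal runs); same values everywhere (objective: alternative).

-- ===== PORT A =====
-- A's loop over idx = 1 .. len-1, carrying the previous value and the streak counter.
def pvLoopA (num den k : Int) : Int → List Int → Int → Bool
  | _, [], _ => false
  | prev, x :: xs, streak =>
    if x * den ≤ prev * num then
      if k ≤ streak + 1 then true else pvLoopA num den k x xs (streak + 1)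
    else
      pvLoopA num den k x xs 0

def alpha_streak_py (values : List Int) (alpha_num : Int) (alpha_den : Int) (k : Int) : Bool :=
  if k ≤ 0 then true
  else match values with
    | [] => false
    | v :: vs => pvLoopA alpha_num alpha_den k v vs 0

-- ===== PORT B =====
-- the boolean pair-condition stream: conds[i-1] = (values[i]*den <= values[i-1]*num)
def pvConds (num den : Int) : List Int → List Bool
  | a :: b :: rest => decide (b * den ≤ a * num) :: pvConds num den (b :: rest)
  | _ => []

-- run-length encoding of the stream, left to right (cur = current key, n = its count so far)
def pvRunsAux (cur : Bool) (n : Int) : List Bool → List (Bool × Int)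
  | [] => [(cur, n)]
  | c :: cs => if c = cur then pvRunsAux cur (n + 1) cs else (cur, n) :: pvRunsAux c 1 cs

def alpha_streak_py_alt (values : List Int) (alpha_num : Int) (alpha_den : Int) (k : Int) : Bool :=
  if k ≤ 0 then true
  else match pvConds alpha_num alpha_den values with
    | [] => false
    | c :: cs => (pvRunsAux c 1 cs).any (fun r => r.1 && decide (k ≤ r.2))

-- ===== PRECONDITION & SPEC =====
def Spec_alpha_streak_py (values : List Int) (alpha_num : Int) (alpha_den : Int) (k : Int) (out : Bool) : Prop := out = alpha_streak_py_alt values alpha_num alpha_den k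
instance (values : List Int) (alpha_num : Int) (alpha_den : Int) (k : Int) (out : Bool) : Decidable (Spec_alpha_streak_py values alpha_num alpha_den k out) := by unfold Spec_alpha_streak_py; infer_instance

-- ===== CLAIM (what is proved, stated in full; the proofs are below) =====
def Claim_equal_alpha_streak_py : Prop := ∀ (values : List Int) (alpha_num : Int) (alpha_den : Int) (k : Int), Dom_alpha_streak_py values alpha_num alpha_den k → Spec_alpha_streak_py values alpha_num alpha_den k (alpha_streak_py values alpha_num alpha_den k)

-- ===== LEMMAS AND PROOFS =====

-- proof-only view of A's loop, on the condition stream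
def pvScan (k : Int) : List Bool → Int → Bool
  | [], _ => false
  | c :: cs, s => if c then (if k ≤ s + 1 then true else pvScan k cs (s + 1)) else pvScan k cs 0

theorem loopA_eq_scan (num den k : Int) (rest : List Int) :
    ∀ (prev s : Int), pvLoopA num den k prev rest s = pvScan k (pvConds num den (prev :: rest)) s := by
  induction rest with
  | nil => intro prev s; simp [pvLoopA, pvConds, pvScan]
  | cons x xs ih =>
    intro prev s
    simp only [pvLoopA, pvConds, pvScan]
    by_cases h : x * den ≤ prev * num
    · simp only [h, if_true]
      by_cases hk : k ≤ s + 1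
      · simp [hk]
      · simp [hk, ih]
    · simp [h, ih]

theorem any_runsAux_true_of_ge (k : Int) (cs : List Bool) :
    ∀ m : Int, k ≤ m → (pvRunsAux true m cs).any (fun r => r.1 && decide (k ≤ r.2)) = true := by
  induction cs with
  | nil => intro m hm; simp [pvRunsAux, hm]
  | cons c cs ih =>
    intro m hm
    by_cases hc : c = true
    · simp only [pvRunsAux, hc, if_true]
      exact ih (m + 1) (by omega)
    · simp [pvRunsAux, hc, hm]

theorem scan_eq_runs (k : Int) (hk : 0 < k) (cs : List Bool) :
    (∀ n : Int, 0 ≤ n → n < k →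
        pvScan k cs n = (pvRunsAux true n cs).any (fun r => r.1 && decide (k ≤ r.2))) ∧
    (∀ m : Int, pvScan k cs 0 = (pvRunsAux false m cs).any (fun r => r.1 && decide (k ≤ r.2))) := by
  induction cs with
  | nil =>
    constructor
    · intro n _ hn; simp [pvScan, pvRunsAux]; omega
    · intro m; simp [pvScan, pvRunsAux]
  | cons c cs ih =>
    obtain ⟨ih1, ih2⟩ := ih
    constructor
    · intro n hn0 hnk
      cases c with
      | true =>
        simp only [pvScan, pvRunsAux, if_true]
        by_cases hk1 : k ≤ n + 1
        · simp only [hk1, if_true]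
          exact (any_runsAux_true_of_ge k cs (n + 1) hk1).symm
        · simp only [hk1, if_false]
          exact ih1 (n + 1) (by omega) (by omega)
      | false =>
        simp only [pvScan, pvRunsAux, Bool.false_eq_true, if_false, List.any_cons]
        have : decide (k ≤ n) = false := by simp; omega
        simp [this, ih2 1]
    · intro m
      cases c with
      | true =>
        simp only [pvScan, pvRunsAux, if_true, Bool.true_eq_false, if_false, List.any_cons]
        by_cases hk1 : k ≤ 0 + 1
        · simp [any_runsAux_true_of_ge k cs 1 (by omega)]
          omega
        · simp only [hk1, if_false]
          simp [ih1 1 (by omega) (by omega)]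
      | false =>
        simp only [pvScan, pvRunsAux, if_false, Bool.false_eq_true, if_true]
        exact ih2 (m + 1)

-- ===== VERDICT (by name: the statement is the Claim_ definition above) =====
theorem alpha_streak_py_spec : Claim_equal_alpha_streak_py := by
  intro values num den k _
  unfold Spec_alpha_streak_py alpha_streak_py alpha_streak_py_alt
  by_cases hk : k ≤ 0
  · simp [hk]
  · simp only [hk, if_false]
    have hk' : 0 < k := by omega
    match values with
    | [] => simp [pvConds]
    | [v] => simp [pvConds, pvLoopA]
    | v :: x :: xs =>
      show pvLoopA num den k v (x :: xs) 0 =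
        ((pvRunsAux (decide (x * den ≤ v * num)) 1 (pvConds num den (x :: xs))).any
          fun r => r.1 && decide (k ≤ r.2))
      rw [loopA_eq_scan]
      simp only [pvConds]
      obtain ⟨h1, h2⟩ := scan_eq_runs k hk' (pvConds num den (x :: xs))
      by_cases hc : x * den ≤ v * num
      · simp only [decide_eq_true hc, pvScan]
        by_cases hk1 : k ≤ 0 + 1
        · simp only [hk1, if_true]
          exact (any_runsAux_true_of_ge k _ 1 (by omega)).symm
        · simp only [hk1, if_false, if_true]
          exact h1 1 (by omega) (by omega)
      · simp only [decide_eq_false hc, pvScan, Bool.false_eq_true, if_false]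
        exact h2 1
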